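-- pv_equiv track=rewrite | github.com/Patrick-Hummel/AI_Simscape_Model_Generator | src/simscape/interface.py | make_positions
-- ===== SOURCE A (Python) =====
-- def make_positions(input_list):
--
--     sub_lists = []
--     start_index = 0
--     odd_count = 1
--
--     while start_index < len(input_list):
--         end_index = start_index + odd_count
--         sub_list = input_list[start_index:end_index]
--         sub_lists.append(sub_list)
--         start_index = end_index
--         odd_count += 2
--
--     new_input_list = []
--
--     for index, sublist in enumerate(sub_lists):
--
--         for subindex, position in enumerate(sublist):
--             new_position = [element + 100 * index for element in position]
--
--             if subindex % 2 == 0: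
--                 new_position[0] = new_position[0] - (subindex // 2) * 100
--                 new_position[2] = new_position[0] + 30
--             else:
--                 new_position[1] = new_position[1] - ((subindex + 1) // 2) * 100
--                 new_position[3] = new_position[1] + 30
--
--             new_input_list.append(new_position)
--
--     return new_input_list
-- ===== SOURCE B (Python) =====
-- def _isqrt(n):
--     k = 0
--     while (k + 1) * (k + 1) <= n:
--         k += 1
--     return k
--
--
-- def make_positions(input_list):
--     new_input_list = []
--     for i, position in enumerate(input_list):
--         # chunk sizes are 1, 3, 5, ..., so element i belongs to chunk
--         # k = isqrt(i), at offset s = i - k*k inside it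
--         k = _isqrt(i)
--         s = i - k * k
--         new_position = [element + 100 * k for element in position]
--         if s % 2 == 0:
--             new_position[0] = new_position[0] - (s // 2) * 100
--             new_position[2] = new_position[0] + 30
--         else:
--             new_position[1] = new_position[1] - ((s + 1) // 2) * 100
--             new_position[3] = new_position[1] + 30
--         new_input_list.append(new_position)
--     return new_input_list
-- ===== Notes on version B (the rewrite author's own statement) =====
-- stated objective: alternative
-- what changed: B drops A's two-phase structure (first materializing the partition into chunks of sizes 1,3,5,... with a while loop over slices, then a nested enumerate loop) and instead makes a single pass over the input, computing each element's chunk index in closed form as isqrt(i) and its offset inside the chunk as i - isqrt(i)**2.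
import Mathlib
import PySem

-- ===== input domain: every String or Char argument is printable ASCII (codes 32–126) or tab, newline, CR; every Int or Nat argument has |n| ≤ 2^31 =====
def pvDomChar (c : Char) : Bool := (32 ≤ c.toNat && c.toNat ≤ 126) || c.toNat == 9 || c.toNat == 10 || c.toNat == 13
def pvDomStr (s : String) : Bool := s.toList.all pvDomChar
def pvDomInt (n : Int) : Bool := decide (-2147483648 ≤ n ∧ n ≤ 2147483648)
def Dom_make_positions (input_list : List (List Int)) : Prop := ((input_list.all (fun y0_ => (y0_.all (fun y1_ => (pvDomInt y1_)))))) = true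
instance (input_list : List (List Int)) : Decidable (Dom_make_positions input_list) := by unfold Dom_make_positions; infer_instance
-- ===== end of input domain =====

-- B replaces A's two-phase partition-then-nested-loop by a single pass that computes each
-- element's chunk index in closed form (integer square root); objective: alternative/simpler.

-- ===== PORT A =====
-- the while loop building sub_lists; fuel = input_list.length is only a totality guard
-- (each iteration consumes at least one element since odd_count ≥ 1 at every call site)
def chunksA (l : List (List Int)) (start odd : Int) : Nat → List (List (List Int))
  | 0 => []
  | fuel + 1 =>
    if start < (l.length : Int) then
      PySem.List.slice l (some start) (some (start + odd)) :: chunksA l (start + odd) (odd + 2) fuel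
    else []

-- the body of A's inner for-loop (one new_position, appended); pyGetD/pySetD are exact
-- here because Pre_ guarantees the indexed positions exist
def stepA (index : Int) (sp : Int × List Int) : List Int :=
  let np := sp.2.map (fun element => element + 100 * index)
  if PySem.Int.mod sp.1 2 == 0 then
    let a := PySem.List.pyGetD np 0 0 - PySem.Int.floordiv sp.1 2 * 100
    PySem.List.pySetD (PySem.List.pySetD np 0 a) 2 (a + 30)
  else
    let b := PySem.List.pyGetD np 1 0 - PySem.Int.floordiv (sp.1 + 1) 2 * 100
    PySem.List.pySetD (PySem.List.pySetD np 1 b) 3 (b + 30)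

def make_positions (input_list : List (List Int)) : List (List Int) :=
  let sub_lists := chunksA input_list 0 1 input_list.length
  (PySem.List.enumerate sub_lists 0).foldl (fun acc idxSub =>
    (PySem.List.enumerate idxSub.2 0).foldl (fun acc2 sp => acc2 ++ [stepA idxSub.1 sp]) acc) []

-- ===== PORT B =====
-- _isqrt's while loop
def pvIsqrt (n k : Int) : Int :=
  if (k + 1) * (k + 1) ≤ n then pvIsqrt n (k + 1) else k
termination_by (n - k).toNat
decreasing_by
  have hk : k < n := by nlinarith [sq_nonneg k, sq_nonneg (k + 1)]
  omega

-- the body of B's single loop: chunk index k = isqrt(i), offset s = i - k*k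
def stepB (ip : Int × List Int) : List Int :=
  let k := pvIsqrt ip.1 0
  let s := ip.1 - k * k
  let np := ip.2.map (fun element => element + 100 * k)
  if PySem.Int.mod s 2 == 0 then
    let a := PySem.List.pyGetD np 0 0 - PySem.Int.floordiv s 2 * 100
    PySem.List.pySetD (PySem.List.pySetD np 0 a) 2 (a + 30)
  else
    let b := PySem.List.pyGetD np 1 0 - PySem.Int.floordiv (s + 1) 2 * 100
    PySem.List.pySetD (PySem.List.pySetD np 1 b) 3 (b + 30)

def make_positions_alt (input_list : List (List Int)) : List (List Int) :=
  (PySem.List.enumerate input_list 0).foldl (fun acc ip => acc ++ [stepB ip]) []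

-- ===== PRECONDITION & SPEC =====
-- Pre_ excludes exactly the inputs on which Python A raises IndexError: the position at
-- global index i (chunk ⌊√i⌋, offset s = i - ⌊√i⌋²) is written at index 2 when s is even
-- (needs length ≥ 3) and at index 3 when s is odd (needs length ≥ 4).
-- kernel-transparent ⌊√n⌋ (Nat.sqrt itself is well-founded and does not reduce under `decide`)
def pvSqrtT (n : Nat) : Nat := ((List.range (n + 1)).countP (fun k => k * k ≤ n)) - 1

def Pre_make_positions (input_list : List (List Int)) : Prop :=
  ∀ pr ∈ input_list.zipIdx,
    if (pr.2 - pvSqrtT pr.2 * pvSqrtT pr.2) % 2 = 0 then 3 ≤ pr.1.length else 4 ≤ pr.1.length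
instance (input_list : List (List Int)) : Decidable (Pre_make_positions input_list) := by
  unfold Pre_make_positions; infer_instance

def pvWitness_make_positions : List (List Int) := [[0, 0, 0], [1, 2, 3], [5, 6, 7, 8], [-1, 0, 1]]

def Spec_make_positions (input_list : List (List Int)) (out : List (List Int)) : Prop := out = make_positions_alt input_list
instance (input_list : List (List Int)) (out : List (List Int)) : Decidable (Spec_make_positions input_list out) := by unfold Spec_make_positions; infer_instance

-- ===== CLAIM (what is proved, stated in full; the proofs are below) =====
def Claim_equal_make_positions : Prop := ∀ (input_list : List (List Int)), Dom_make_positions input_list → Pre_make_positions input_list → Spec_make_positions input_list (make_positions input_list)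

-- ===== LEMMAS AND PROOFS =====

-- the common per-element value, in Nat form: chunk k, offset s
def gBody (k s : Nat) (p : List Int) : List Int :=
  let q := p.map (fun e => e + 100 * (k : Int))
  if s % 2 = 0 then
    let a := q.getD 0 0 - ((s / 2 : Nat) : Int) * 100
    (q.set 0 a).set 2 (a + 30)
  else
    let b := q.getD 1 0 - (((s + 1) / 2 : Nat) : Int) * 100
    (q.set 1 b).set 3 (b + 30)

-- the common per-element value at global index i
def gOne (i : Nat) (p : List Int) : List Int := gBody (Nat.sqrt i) (i - Nat.sqrt i * Nat.sqrt i) p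

def gMap (n : Nat) : List (List Int) → List (List Int)
  | [] => []
  | p :: t => gOne n p :: gMap (n + 1) t

theorem gMap_take_drop (xs : List (List Int)) : ∀ (n m : Nat),
    gMap n (xs.take m) ++ gMap (n + m) (xs.drop m) = gMap n xs := by
  induction xs with
  | nil => intro n m; simp [gMap]
  | cons p t ih =>
    intro n m
    cases m with
    | zero => simp [gMap]
    | succ m =>
      simp only [List.take_succ_cons, List.drop_succ_cons, gMap]
      rw [show n + (m + 1) = (n + 1) + m by omega]
      simp [ih (n + 1) m]

-- Python-int arithmetic on a nonnegative index reduces to the Nat form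
theorem stepA_eq_gBody (j s : Nat) (p : List Int) : stepA (j : Int) ((s : Int), p) = gBody j s p := by
  have hd1 : PySem.Int.floordiv (s : Int) 2 = ((s / 2 : Nat) : Int) := by
    exact_mod_cast PySem.Int.floordiv_natCast s 2
  have hd2 : PySem.Int.floordiv ((s : Int) + 1) 2 = (((s + 1) / 2 : Nat) : Int) := by
    rw [show (s : Int) + 1 = ((s + 1 : Nat) : Int) by push_cast; ring]
    exact_mod_cast PySem.Int.floordiv_natCast (s + 1) 2
  have hm : PySem.Int.mod (s : Int) 2 = ((s % 2 : Nat) : Int) := by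
    exact_mod_cast PySem.Int.mod_natCast s 2
  have hg0 : ∀ q : List Int, PySem.List.pyGetD q 0 0 = q.getD 0 0 := fun q => by
    exact_mod_cast PySem.List.pyGetD_natCast q 0 0
  have hg1 : ∀ q : List Int, PySem.List.pyGetD q 1 0 = q.getD 1 0 := fun q => by
    exact_mod_cast PySem.List.pyGetD_natCast q 1 0
  have hs0 : ∀ (q : List Int) (v : Int), PySem.List.pySetD q 0 v = q.set 0 v := fun q v => by
    exact_mod_cast PySem.List.pySetD_natCast q 0 v
  have hs1 : ∀ (q : List Int) (v : Int), PySem.List.pySetD q 1 v = q.set 1 v := fun q v => by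
    exact_mod_cast PySem.List.pySetD_natCast q 1 v
  have hs2 : ∀ (q : List Int) (v : Int), PySem.List.pySetD q 2 v = q.set 2 v := fun q v => by
    exact_mod_cast PySem.List.pySetD_natCast q 2 v
  have hs3 : ∀ (q : List Int) (v : Int), PySem.List.pySetD q 3 v = q.set 3 v := fun q v => by
    exact_mod_cast PySem.List.pySetD_natCast q 3 v
  simp only [stepA, gBody, hd1, hd2, hm, hg0, hg1, hs0, hs1, hs2, hs3]
  by_cases hp : s % 2 = 0
  · simp [hp]
  · have h1 : s % 2 = 1 := by omega
    simp [h1]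

theorem stepB_eq_stepA (i : Int) (p : List Int) :
    stepB (i, p) = stepA (pvIsqrt i 0) (i - pvIsqrt i 0 * pvIsqrt i 0, p) := by
  simp only [stepB, stepA]

theorem pvIsqrt_eq_sqrt (n : Nat) : ∀ k : Nat, k * k ≤ n → pvIsqrt (n : Int) (k : Int) = (Nat.sqrt n : Int) := by
  intro k hk
  induction hn : n - k using Nat.strong_induction_on generalizing k with
  | _ m ih =>
    rw [pvIsqrt]
    by_cases h : ((k : Int) + 1) * ((k : Int) + 1) ≤ (n : Int)
    · rw [if_pos h]
      have h' : (k + 1) * (k + 1) ≤ n := by exact_mod_cast h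
      have hkn : k < n := by nlinarith
      rw [show (k : Int) + 1 = ((k + 1 : Nat) : Int) by push_cast; ring]
      exact ih (n - (k + 1)) (by omega) (k + 1) h' rfl
    · rw [if_neg h]
      have h' : ¬ (k + 1) * (k + 1) ≤ n := by exact_mod_cast h
      have h1 : k ≤ Nat.sqrt n := Nat.le_sqrt.mpr hk
      have h2 : Nat.sqrt n ≤ k := by
        by_contra hc
        push Not at hc
        exact h' (le_trans (Nat.mul_le_mul hc hc) (Nat.sqrt_le n))
      omega

-- B's per-element step equals gOne at a nonnegative cast index
theorem stepB_eq_gOne (i : Nat) (p : List Int) : stepB ((i : Int), p) = gOne i p := by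
  have hs : pvIsqrt (i : Int) 0 = (Nat.sqrt i : Int) := by
    have := pvIsqrt_eq_sqrt i 0 (by omega)
    simpa using this
  have hle := Nat.sqrt_le i
  have hsub : (i : Int) - (Nat.sqrt i : Int) * (Nat.sqrt i : Int) = ((i - Nat.sqrt i * Nat.sqrt i : Nat) : Int) := by
    omega
  rw [stepB_eq_stepA (i : Int) p, hs, hsub, stepA_eq_gBody, gOne]

theorem foldl_stepB (l : List (List Int)) : ∀ (n : Nat) (acc : List (List Int)),
    (PySem.List.enumerate l (n : Int)).foldl (fun acc ip => acc ++ [stepB ip]) acc = acc ++ gMap n l := by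
  induction l with
  | nil => intro n acc; simp [PySem.List.enumerate_nil, gMap]
  | cons p t ih =>
    intro n acc
    rw [PySem.List.enumerate_cons]
    simp only [List.foldl_cons]
    rw [show (n : Int) + 1 = ((n + 1 : Nat) : Int) by push_cast; ring, ih (n + 1), gMap,
      stepB_eq_gOne]
    simp

-- within chunk j (global indices j*j .. j*j+2j), ⌊√·⌋ is j, so gBody matches gOne
theorem gBody_eq_gOne (j s : Nat) (hs : s ≤ 2 * j) (p : List Int) : gBody j s p = gOne (j * j + s) p := by
  have hsqrt : Nat.sqrt (j * j + s) = j := by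
    have h1 : j ≤ Nat.sqrt (j * j + s) := Nat.le_sqrt.mpr (by omega)
    have h2 : Nat.sqrt (j * j + s) < j + 1 := by
      have := Nat.sqrt_le (j * j + s)
      by_contra hc
      push Not at hc
      nlinarith
    omega
  rw [gOne, hsqrt, Nat.add_sub_cancel_left]

-- the inner for-loop over one chunk, chunk index j, chunk length ≤ 2j+1
theorem innerA_eq (j : Nat) (sub : List (List Int)) :
    ∀ (s0 : Nat) (acc : List (List Int)), s0 + sub.length ≤ 2 * j + 1 →
    (PySem.List.enumerate sub (s0 : Int)).foldl (fun acc2 sp => acc2 ++ [stepA (j : Int) sp]) acc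
      = acc ++ gMap (j * j + s0) sub := by
  induction sub with
  | nil => intro s0 acc _; simp [PySem.List.enumerate_nil, gMap]
  | cons p t ih =>
    intro s0 acc hlen
    rw [PySem.List.enumerate_cons]
    simp only [List.foldl_cons]
    have hl : s0 ≤ 2 * j := by simp at hlen; omega
    rw [show (s0 : Int) + 1 = ((s0 + 1 : Nat) : Int) by push_cast; ring,
      ih (s0 + 1) _ (by simp at hlen ⊢; omega), gMap, stepA_eq_gBody, gBody_eq_gOne j s0 hl]
    simp [Nat.add_assoc]

-- the outer loop over the chunks built from position start = j*j onwards
theorem outerA_eq (l : List (List Int)) :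
    ∀ (fuel j start : Nat), start = j * j → l.length ≤ start + fuel →
    ∀ acc : List (List Int),
    (PySem.List.enumerate (chunksA l (start : Int) ((2 * j + 1 : Nat) : Int) fuel) (j : Int)).foldl
      (fun acc idxSub =>
        (PySem.List.enumerate idxSub.2 0).foldl (fun acc2 sp => acc2 ++ [stepA idxSub.1 sp]) acc) acc
    = acc ++ gMap start (l.drop start) := by
  intro fuel
  induction fuel with
  | zero =>
    intro j start hst hlen acc
    have hd : l.drop start = [] := List.drop_eq_nil_of_le (by omega)
    simp [chunksA, PySem.List.enumerate_nil, hd, gMap]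
  | succ fuel ih =>
    intro j start hst hlen acc
    rw [chunksA]
    by_cases hlt : (start : Int) < (l.length : Int)
    · rw [if_pos hlt]
      have hltn : start < l.length := by exact_mod_cast hlt
      rw [PySem.List.enumerate_cons]
      simp only [List.foldl_cons]
      rw [PySem.List.slice_natCast_add l start (2 * j + 1)]
      set chunk := (l.drop start).take (2 * j + 1) with hchunk
      have hclen : chunk.length ≤ 2 * j + 1 := by simp [hchunk]
      have hinner := innerA_eq j chunk 0 acc (by omega)
      simp only [Nat.cast_zero] at hinner
      rw [hinner]
      rw [show (j : Int) + 1 = ((j + 1 : Nat) : Int) by push_cast; ring,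
        show (start : Int) + ((2 * j + 1 : Nat) : Int) = ((start + (2 * j + 1) : Nat) : Int) by push_cast; ring,
        show ((2 * j + 1 : Nat) : Int) + 2 = ((2 * (j + 1) + 1 : Nat) : Int) by push_cast; ring,
        ih (j + 1) (start + (2 * j + 1)) (by nlinarith) (by omega)]
      rw [List.append_assoc]
      congr 1
      rw [show j * j + 0 = start by omega, ← List.drop_drop]
      exact gMap_take_drop (l.drop start) start (2 * j + 1)
    · rw [if_neg hlt]
      have hge : l.length ≤ start := by exact_mod_cast (le_of_not_gt hlt)
      have hd : l.drop start = [] := List.drop_eq_nil_of_le hge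
      simp [PySem.List.enumerate_nil, hd, gMap]

-- ===== VERDICT (by name: the statement is the Claim_ definition above) =====
theorem make_positions_spec : Claim_equal_make_positions := by
  intro l _ _
  unfold Spec_make_positions make_positions make_positions_alt
  have hA := outerA_eq l l.length 0 0 (by omega) (by omega) []
  simp only [Nat.cast_zero] at hA
  have hB := foldl_stepB l 0 []
  simp only [Nat.cast_zero] at hB
  simp only [List.drop_zero, List.nil_append] at hA hB
  rw [show ((2 * 0 + 1 : Nat) : Int) = 1 by norm_num] at hA
  rw [hB, hA]
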